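-- pv_equiv track=rewrite | github.com/KardelRuveyda/uretken-yapayzeka-chatbot-gelistirme-temelleri | homeworks/ytu/Ahmet_Furkan_Karslı/sifre_kirici.py | sifrele
-- ===== SOURCE A (Python) =====
-- def sifrele(mesaj):
--  sonuc = ""
--  i = 0
--  while i < len(mesaj):
--   karakter = mesaj[i]
--   if karakter.isalpha():
--    sonuc += chr((ord(karakter) - ord('a') + 5) % 26 + ord('a'))
--    i += 1
--   elif karakter.isdigit():
--    sayi = ""
--    while i < len(mesaj) and mesaj[i].isdigit():
--     sayi += mesaj[i]
--     i += 1
--    sonuc += sayi[::-1]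
--   else:
--    sonuc += karakter
--    i += 1
--  return sonuc
-- ===== SOURCE B (Python) =====
-- def sifrele(mesaj):
--     # Split the message into maximal runs of one class (alpha / digit / other),
--     # then transform each run as a whole and join the pieces.
--     def classify(c):
--         return 0 if c.isalpha() else 1 if c.isdigit() else 2
--
--     runs = []
--     i = 0
--     n = len(mesaj)
--     while i < n:
--         k = classify(mesaj[i])
--         j = i + 1
--         while j < n and classify(mesaj[j]) == k:
--             j += 1
--         runs.append((k, mesaj[i:j]))
--         i = j
--
--     out = []
--     for k, run in runs:
--         if k == 0:
--             out.append(''.join(chr((ord(ch) - ord('a') + 5) % 26 + ord('a')) for ch in run))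
--         elif k == 1:
--             out.append(run[::-1])
--         else:
--             out.append(run)
--     return ''.join(out)
-- ===== Notes on version B (the rewrite author's own statement) =====
-- stated objective: faster
-- what changed: B decomposes the string into maximal same-class runs (alpha/digit/other) first and then transforms each run as a whole (shift alphas, reverse digit runs, copy the rest) joined at the end, instead of A's character-indexed while loop with a nested digit-accumulator loop and repeated string concatenation.
import Mathlib
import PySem

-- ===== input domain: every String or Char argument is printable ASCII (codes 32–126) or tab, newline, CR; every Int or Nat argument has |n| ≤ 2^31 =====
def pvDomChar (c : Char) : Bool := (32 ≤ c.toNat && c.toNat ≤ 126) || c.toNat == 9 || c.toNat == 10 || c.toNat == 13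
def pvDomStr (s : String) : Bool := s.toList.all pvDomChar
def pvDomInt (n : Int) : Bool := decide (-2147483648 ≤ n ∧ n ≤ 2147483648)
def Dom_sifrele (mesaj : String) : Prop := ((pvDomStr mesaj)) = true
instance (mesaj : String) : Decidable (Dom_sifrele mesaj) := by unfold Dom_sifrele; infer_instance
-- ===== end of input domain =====

-- B splits the string into maximal same-class runs and transforms each run as a whole (joined at the end),
-- replacing A's character-indexed while loop with its repeated string concatenation; measured faster, same value everywhere.

-- ===== PORT A =====
-- chr((ord(karakter) - ord('a') + 5) % 26 + ord('a'))  (Python %, divisor 26 > 0)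
def pvShiftA (c : Char) : Char :=
  Char.ofNat ((PySem.Int.mod ((c.toNat : Int) - 97 + 5) 26 + 97).toNat)

-- the inner 'while i < len(mesaj) and mesaj[i].isdigit()' accumulator: (sayi, rest after the run)
def pvDigitsA : List Char → List Char × List Char
  | [] => ([], [])
  | c :: rest =>
    if PySem.Chars.isdigit c then
      let p := pvDigitsA rest
      (c :: p.1, p.2)
    else ([], c :: rest)

theorem pvDigitsA_snd_len : ∀ l : List Char, (pvDigitsA l).2.length ≤ l.length := by
  intro l
  induction l with
  | nil => simp [pvDigitsA]
  | cons c rest ih =>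
    simp only [pvDigitsA]
    split
    · simpa using Nat.le_succ_of_le ih
    · simp

-- the outer while loop of A
def sifreleGoA : List Char → List Char
  | [] => []
  | c :: rest =>
    if PySem.Chars.isalpha c then
      pvShiftA c :: sifreleGoA rest
    else if PySem.Chars.isdigit c then
      -- sayi = c :: digits of rest; sonuc += sayi[::-1], i jumps past the run
      (c :: (pvDigitsA rest).1).reverse ++ sifreleGoA (pvDigitsA rest).2
    else
      c :: sifreleGoA rest
termination_by l => l.length
decreasing_by
  · simp
  · exact Nat.lt_succ_of_le (pvDigitsA_snd_len rest)
  · simp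

def sifrele (mesaj : String) : String := String.mk (sifreleGoA mesaj.toList)

-- ===== PORT B =====
def pvShiftB (c : Char) : Char :=
  Char.ofNat ((PySem.Int.mod ((c.toNat : Int) - 97 + 5) 26 + 97).toNat)

def pvClassify (c : Char) : Nat :=
  if PySem.Chars.isalpha c then 0 else if PySem.Chars.isdigit c then 1 else 2

-- the run-splitting while loop of B: list of (class, maximal run)
def pvRuns : List Char → List (Nat × List Char)
  | [] => []
  | c :: rest =>
    let k := pvClassify c
    (k, c :: rest.takeWhile (fun d => pvClassify d == k)) ::
      pvRuns (rest.dropWhile (fun d => pvClassify d == k))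
termination_by l => l.length
decreasing_by
  exact Nat.lt_succ_of_le (List.length_dropWhile_le _ _)

def pvRunOut (p : Nat × List Char) : List Char :=
  if p.1 = 0 then p.2.map pvShiftB
  else if p.1 = 1 then p.2.reverse
  else p.2

def sifrele_alt (mesaj : String) : String :=
  String.mk (((pvRuns mesaj.toList).map pvRunOut).flatten)

-- ===== PRECONDITION & SPEC =====
def Spec_sifrele (mesaj : String) (out : String) : Prop := out = sifrele_alt mesaj
instance (mesaj : String) (out : String) : Decidable (Spec_sifrele mesaj out) := by unfold Spec_sifrele; infer_instance

-- ===== CLAIM (what is proved, stated in full; the proofs are below) =====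
def Claim_equal_sifrele : Prop := ∀ (mesaj : String), Dom_sifrele mesaj → Spec_sifrele mesaj (sifrele mesaj)

-- ===== LEMMAS AND PROOFS =====

-- ASCII letter and digit ranges are disjoint, for every Char
theorem pv_alpha_not_digit (c : Char) (h : PySem.Chars.isalpha c = true) :
    PySem.Chars.isdigit c = false := by
  simp only [PySem.Chars.isalpha, PySem.Chars.isupper, PySem.Chars.islower, PySem.Chars.isdigit,
    Bool.or_eq_true, Bool.and_eq_true, decide_eq_true_eq, Char.le_def] at h ⊢
  simp only [Bool.and_eq_false_iff, decide_eq_false_iff_not] at *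
  rcases h with ⟨h1, h2⟩ | ⟨h1, h2⟩ <;> right <;>
    simp_all [UInt32.le_iff_toNat_le] <;> omega

theorem pv_shift_eq : pvShiftA = pvShiftB := rfl

theorem pvDigitsA_eq (l : List Char) :
    pvDigitsA l = (l.takeWhile PySem.Chars.isdigit, l.dropWhile PySem.Chars.isdigit) := by
  induction l with
  | nil => rfl
  | cons c rest ih =>
    simp only [pvDigitsA, List.takeWhile, List.dropWhile]
    cases h : PySem.Chars.isdigit c <;> simp [ih]

theorem pv_goA_alpha (g r : List Char) (hg : ∀ d ∈ g, PySem.Chars.isalpha d = true) :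
    sifreleGoA (g ++ r) = g.map pvShiftA ++ sifreleGoA r := by
  induction g with
  | nil => rfl
  | cons c g ih =>
    have hc := hg c (by simp)
    simp only [List.cons_append, sifreleGoA, hc, if_pos]
    simp [ih (fun d hd => hg d (by simp [hd]))]

theorem pv_goA_other (g r : List Char)
    (hg : ∀ d ∈ g, PySem.Chars.isalpha d = false ∧ PySem.Chars.isdigit d = false) :
    sifreleGoA (g ++ r) = g ++ sifreleGoA r := by
  induction g with
  | nil => rfl
  | cons c g ih =>
    obtain ⟨h1, h2⟩ := hg c (by simp)
    simp only [List.cons_append, sifreleGoA, h1, h2]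
    simp [ih (fun d hd => hg d (by simp [hd]))]

theorem pv_classify_digit_pred :
    (fun d => pvClassify d == 1) = PySem.Chars.isdigit := by
  funext d
  unfold pvClassify
  cases ha : PySem.Chars.isalpha d
  · cases hd : PySem.Chars.isdigit d <;> simp_all
  · simp [pv_alpha_not_digit d ha]

theorem pv_goA_eq_runs_aux : ∀ (n : Nat) (l : List Char), l.length ≤ n →
    sifreleGoA l = ((pvRuns l).map pvRunOut).flatten := by
  intro n
  induction n with
  | zero =>
    intro l hl
    have : l = [] := List.eq_nil_of_length_eq_zero (Nat.le_zero.mp hl)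
    subst this
    simp [sifreleGoA, pvRuns]
  | succ n ihn =>
    intro l hl
    match l with
    | [] => simp [sifreleGoA, pvRuns]
    | c :: rest =>
      have hrest : rest.length ≤ n := Nat.lt_succ_iff.mp (by simpa using hl)
      have hrec : ∀ r : List Char, r.length ≤ rest.length →
          sifreleGoA r = ((pvRuns r).map pvRunOut).flatten := by
        intro r hr
        exact ihn r (le_trans hr hrest)
      by_cases ha : PySem.Chars.isalpha c = true
      · -- alpha run
        have hk : pvClassify c = 0 := by simp [pvClassify, ha]
        have hpred : (fun d => pvClassify d == 0) = PySem.Chars.isalpha := by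
          funext d
          unfold pvClassify
          cases h1 : PySem.Chars.isalpha d
          · cases h2 : PySem.Chars.isdigit d <;> simp_all
          · simp
        rw [pvRuns]
        simp only [hk, hpred]
        rw [sifreleGoA, if_pos ha]
        have hsplit : rest = rest.takeWhile PySem.Chars.isalpha ++ rest.dropWhile PySem.Chars.isalpha :=
          (List.takeWhile_append_dropWhile).symm
        conv_lhs => rw [hsplit]
        rw [pv_goA_alpha (rest.takeWhile PySem.Chars.isalpha) (rest.dropWhile PySem.Chars.isalpha)
          (fun d hd => List.mem_takeWhile_imp hd)]
        rw [hrec _ (List.length_dropWhile_le _ _)]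
        simp [pvRunOut, pv_shift_eq]
      · by_cases hd : PySem.Chars.isdigit c = true
        · -- digit run
          have hk : pvClassify c = 1 := by simp [pvClassify, ha, hd]
          rw [pvRuns]
          simp only [hk, pv_classify_digit_pred]
          rw [sifreleGoA, if_neg ha, if_pos hd, pvDigitsA_eq]
          rw [hrec _ (List.length_dropWhile_le _ _)]
          simp [pvRunOut]
        · -- other run
          have hk : pvClassify c = 2 := by simp [pvClassify, ha, hd]
          have hpred : (fun d => pvClassify d == 2)
              = (fun d => !(PySem.Chars.isalpha d) && !(PySem.Chars.isdigit d)) := by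
            funext d
            unfold pvClassify
            cases h1 : PySem.Chars.isalpha d
            · cases h2 : PySem.Chars.isdigit d <;> simp_all
            · simp
          rw [pvRuns]
          simp only [hk, hpred]
          set p := fun d => !(PySem.Chars.isalpha d) && !(PySem.Chars.isdigit d) with hp
          rw [sifreleGoA, if_neg ha, if_neg hd]
          have hsplit : rest = rest.takeWhile p ++ rest.dropWhile p :=
            (List.takeWhile_append_dropWhile).symm
          conv_lhs => rw [hsplit]
          rw [pv_goA_other (rest.takeWhile p) (rest.dropWhile p)
            (fun d hdm => by
              have h := List.mem_takeWhile_imp hdm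
              rw [hp] at h
              simp only [Bool.and_eq_true, Bool.not_eq_true'] at h
              exact h)]
          rw [hrec _ (List.length_dropWhile_le _ _)]
          simp [pvRunOut]

theorem pv_goA_eq_runs (l : List Char) :
    sifreleGoA l = ((pvRuns l).map pvRunOut).flatten :=
  pv_goA_eq_runs_aux l.length l le_rfl

-- ===== VERDICT (by name: the statement is the Claim_ definition above) =====
theorem sifrele_spec : Claim_equal_sifrele := by
  intro mesaj _
  unfold Spec_sifrele sifrele sifrele_alt
  rw [pv_goA_eq_runs]
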